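-- pv_equiv track=rewrite | github.com/wnstj-yang/Algorithm | Programmers/programmers_완주하지 못한 선수_2.py | solution
-- ===== SOURCE A (Python) =====
-- def solution(participant, completion):
--     answer = ''
--     result = participant + completion
--     part_list = {}
--     for name in result:
--         if name in part_list:
--             part_list[name] += 1
--         else:
--             part_list[name] = 1
--     for key, val in part_list.items():
--         if val % 2 == 1:
--             answer = key
--             break
--     return answer
-- ===== SOURCE B (Python) =====
-- def solution(participant, completion):
--     rest = participant + completion
--     while rest:
--         x = rest[0]
--         if rest.count(x) % 2 == 1:
--             return x
--         rest = [y for y in rest if y != x]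
--     return ''
-- ===== Notes on version B (the rewrite author's own statement) =====
-- stated objective: alternative
-- what changed: Replaces the occurrence-count dictionary and dict-items scan by repeated elimination: check the parity of the head name's count in the remaining list directly, and if even filter out all its occurrences and repeat; no dict or set is built.
import Mathlib
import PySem

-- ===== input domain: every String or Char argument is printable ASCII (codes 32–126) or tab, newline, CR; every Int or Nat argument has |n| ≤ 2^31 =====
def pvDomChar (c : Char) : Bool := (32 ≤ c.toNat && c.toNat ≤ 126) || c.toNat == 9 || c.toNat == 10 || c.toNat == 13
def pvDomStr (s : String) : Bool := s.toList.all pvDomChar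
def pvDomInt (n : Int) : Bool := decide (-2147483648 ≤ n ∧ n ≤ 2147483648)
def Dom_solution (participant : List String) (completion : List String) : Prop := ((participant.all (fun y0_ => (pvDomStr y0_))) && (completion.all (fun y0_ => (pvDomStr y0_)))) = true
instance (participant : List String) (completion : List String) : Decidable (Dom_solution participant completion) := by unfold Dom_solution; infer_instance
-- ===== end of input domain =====

-- B replaces A's count dictionary + dict-items scan by repeated elimination: test the parity
-- of the head's count in the remaining list directly, and if it is even filter the name out
-- and repeat — no dict or set is built (alternative decomposition, not claimed faster).

-- ===== PORT A =====
-- the counting loop: 'if name in part_list: part_list[name] += 1 else: part_list[name] = 1'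
def solnDict (result : List String) : PySem.Dict String Int :=
  result.foldl (fun d name =>
    if d.contains name then d.modify name 0 (· + 1) else d.insert name 1) PySem.Dict.empty

-- the items loop with 'break': returns the first key with odd value, else the incoming answer
def solnScan : List (String × Int) → String → String
  | [], answer => answer
  | (key, val) :: rest, answer =>
    if val % 2 == 1 then key else solnScan rest answer

def solution (participant : List String) (completion : List String) : String :=
  let answer := ""
  let result := participant ++ completion
  let part_list := solnDict result
  solnScan part_list.items answer

-- ===== PORT B =====
-- the 'while rest:' loop; 'x = rest[0]' is the head of the pattern, and the comprehension
-- '[y for y in rest if y != x]' is 'rest.filter (!(· == x))' (x itself never passes the filter)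
def altLoop (l : List String) : String :=
  match l with
  | [] => ""
  | x :: rest =>
    if ((x :: rest).count x : Int) % 2 == 1 then x
    else altLoop (rest.filter (fun y => !(y == x)))
termination_by l.length
decreasing_by
  simp only [List.length_cons, List.length_unattach]
  exact Nat.lt_succ_of_le (le_trans (List.length_filter_le _ _) (by simp))

def solution_alt (participant : List String) (completion : List String) : String :=
  altLoop (participant ++ completion)

-- ===== PRECONDITION & SPEC =====
def Spec_solution (participant : List String) (completion : List String) (out : String) : Prop := out = solution_alt participant completion
instance (participant : List String) (completion : List String) (out : String) : Decidable (Spec_solution participant completion out) := by unfold Spec_solution; infer_instance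

-- ===== CLAIM (what is proved, stated in full; the proofs are below) =====
def Claim_equal_solution : Prop := ∀ (participant : List String) (completion : List String), Dom_solution participant completion → Spec_solution participant completion (solution participant completion)

-- ===== LEMMAS AND PROOFS =====

-- A's counting fold is Counter
theorem solnDict_eq_counter (result : List String) :
    solnDict result = PySem.Dict.counter result := by
  unfold solnDict
  rw [PySem.Dict.counter_eq_foldl]
  apply PySem.List.foldl_congr_mem
  intro d name _
  by_cases hc : d.contains name = true
  · simp [hc]
  · simp [hc, PySem.Dict.modify]
    congr 1
    have : d.get? name = none := by
      rw [PySem.Dict.get?_eq_none_iff_contains]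
      simpa using hc
    simp [PySem.Dict.getD, this]

-- the items scan over (k, count k) pairs is a find? on the keys
theorem solnScan_map (res : List String) (l : List String) :
    solnScan (l.map (fun k => (k, (res.count k : Int)))) "" =
      (l.find? (fun k => (res.count k : Int) % 2 == 1)).getD "" := by
  induction l with
  | nil => simp [solnScan]
  | cons x xs ih =>
    simp only [List.map_cons, solnScan, List.find?_cons]
    by_cases hp : ((res.count x : Int) % 2 == 1) = true
    · simp [hp]
    · simp only [Bool.not_eq_true] at hp
      simp [hp, ih]

-- find? is unchanged by filtering out elements that fail the predicate
theorem find?_filter_ne {p : String → Bool} (x : String) (hx : p x = false) :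
    ∀ s : List String, (s.filter (fun y => !(y == x))).find? p = s.find? p := by
  intro s
  induction s with
  | nil => rfl
  | cons y ys ih =>
    by_cases hyx : y = x
    · subst hyx
      simp [hx, ih]
    · rw [List.filter_cons_of_pos (by simp [hyx])]
      cases hpy : p y
      · rw [List.find?_cons_of_neg (by simp [hpy]), List.find?_cons_of_neg (by simp [hpy]), ih]
      · rw [List.find?_cons_of_pos hpy, List.find?_cons_of_pos hpy]

-- first match in the ordered dedup = first match in the original list
theorem find?_ofList (p : String → Bool) (xs : List String) :
    (PySem.Set.ofList xs).find? p = xs.find? p := by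
  induction xs with
  | nil => rfl
  | cons x xs ih =>
    rw [PySem.Set.ofList_cons]
    cases hpx : p x
    · rw [List.find?_cons_of_neg (by simp [hpx]), List.find?_cons_of_neg (by simp [hpx])]
      rw [← ih]
      exact find?_filter_ne x hpx _
    · rw [List.find?_cons_of_pos hpx, List.find?_cons_of_pos hpx]

-- count is unchanged by filtering out a DIFFERENT element
theorem count_filter_ne (a x : String) (h : a ≠ x) (l : List String) :
    (l.filter (fun y => !(y == x))).count a = l.count a := by
  induction l with
  | nil => rfl
  | cons y ys ih =>
    by_cases hyx : y = x
    · subst hyx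
      rw [List.filter_cons_of_neg (by simp)]
      simp [ih, Ne.symm h]
    · rw [List.filter_cons_of_pos (by simp [hyx])]
      simp [List.count_cons, ih]

-- find? only looks at the predicate on members
theorem find?_congr_mem (p q : String → Bool) :
    ∀ l : List String, (∀ y ∈ l, p y = q y) → l.find? p = l.find? q := by
  intro l
  induction l with
  | nil => intro _; rfl
  | cons y ys ih =>
    intro h
    have hy := h y (by simp)
    cases hq : q y
    · rw [List.find?_cons_of_neg (by simp [hy, hq]), List.find?_cons_of_neg (by simp [hq])]
      exact ih (fun z hz => h z (by simp [hz]))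
    · rw [List.find?_cons_of_pos (by rw [hy, hq]), List.find?_cons_of_pos hq]

-- B's elimination loop computes the first element with odd multiplicity
theorem altLoop_eq_aux : ∀ (n : Nat) (l : List String), l.length ≤ n →
    altLoop l = (l.find? (fun k => (l.count k : Int) % 2 == 1)).getD "" := by
  intro n
  induction n with
  | zero =>
    intro l hl
    have hnil : l = [] := by cases l with
      | nil => rfl
      | cons a as => simp at hl
    subst hnil
    simp [altLoop]
  | succ n ih =>
    intro l hl
    match l with
    | [] => simp [altLoop]
    | x :: rest =>
      rw [altLoop]
      by_cases hodd : (((x :: rest).count x : Int) % 2 == 1) = true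
      · rw [if_pos hodd]
        rw [List.find?_cons_of_pos (p := fun k => (((x :: rest).count k : Int)) % 2 == 1) hodd]
        rfl
      · rw [if_neg hodd]
        have hlen : (rest.filter (fun y => !(y == x))).length ≤ n :=
          le_trans (List.length_filter_le _ _) (by simpa using Nat.le_of_succ_le_succ hl)
        rw [ih _ hlen]
        have h1 : (x :: rest).find? (fun k => ((x :: rest).count k : Int) % 2 == 1)
            = rest.find? (fun k => ((x :: rest).count k : Int) % 2 == 1) :=
          List.find?_cons_of_neg hodd
        rw [h1, ← find?_filter_ne x (by simpa using hodd) rest]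
        refine congrArg (fun o => Option.getD o "") (find?_congr_mem _ _ _ ?_)
        intro y hy
        have hymem := List.mem_filter.mp hy
        have hyx : y ≠ x := by
          have := hymem.2; simp at this; exact this
        rw [count_filter_ne y x hyx rest]
        simp [Ne.symm hyx]

theorem altLoop_eq (l : List String) :
    altLoop l = (l.find? (fun k => (l.count k : Int) % 2 == 1)).getD "" :=
  altLoop_eq_aux l.length l le_rfl

-- ===== VERDICT (by name: the statement is the Claim_ definition above) =====
theorem solution_spec : Claim_equal_solution := by
  intro participant completion _
  unfold Spec_solution solution solution_alt
  simp only []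
  rw [solnDict_eq_counter, PySem.Dict.items_counter]
  set res := participant ++ completion with hres
  rw [solnScan_map res (PySem.Set.ofList res)]
  rw [find?_ofList, ← altLoop_eq]
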